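-- pv_equiv track=rewrite | github.com/Ghoulsimi07/SAPPI | breakPreReq.py | commasReduction
-- ===== SOURCE A (Python) =====
-- def commasReduction(text):
--     stack = []
--
--     for char in range(len(text)):
--         if text[char] == '(':
--
--             wordToPush = ''
--             for nextChar in text[char+1:]:
--                 if nextChar == '(':
--                     continue
--                 elif nextChar == ')':
--                     if wordToPush not in stack:
--                         stack.append(wordToPush)
--                     break
--                 else:
--                     wordToPush += nextChar
--
--     if '(' not in text:
--         stack.append(text)
--
--     return stack
-- ===== SOURCE B (Python) =====
-- def commasReduction(text):
--     # One left-to-right pass: maintain one accumulator per open '(' seen so far.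
--     active = []
--     stack = []
--     for ch in text:
--         if ch == '(':
--             active.append('')
--         elif ch == ')':
--             for w in active:
--                 if w not in stack:
--                     stack.append(w)
--             active = []
--         else:
--             active = [w + ch for w in active]
--     if '(' not in text:
--         stack.append(text)
--     return stack
-- ===== Notes on version B (the rewrite author's own statement) =====
-- stated objective: alternative
-- what changed: Replaces A's restart-a-fresh-inner-scan-at-every-'(' nested loop with a single left-to-right pass that maintains one accumulator per currently open '(' and flushes all of them (with A's dedup) at each ')'.
import Mathlib
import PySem

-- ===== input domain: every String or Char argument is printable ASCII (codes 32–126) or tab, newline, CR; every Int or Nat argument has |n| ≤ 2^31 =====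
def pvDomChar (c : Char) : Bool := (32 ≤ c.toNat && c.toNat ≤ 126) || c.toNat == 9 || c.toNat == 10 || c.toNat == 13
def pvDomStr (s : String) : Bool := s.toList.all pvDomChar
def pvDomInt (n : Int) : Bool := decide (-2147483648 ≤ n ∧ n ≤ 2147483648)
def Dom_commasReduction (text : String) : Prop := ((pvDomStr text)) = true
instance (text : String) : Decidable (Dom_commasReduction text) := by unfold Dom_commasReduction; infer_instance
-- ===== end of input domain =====

-- B replaces A's nested restart-at-each-'(' scan by one pass keeping an accumulator per open '(' (alternative decomposition, same results).

-- ===== PORT A =====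
-- inner loop: 'for nextChar in text[char+1:]: …' with continue/break
def pvInnerA (stack : List String) (word : String) : List Char → List String
  | [] => stack
  | c :: r =>
    if c = '(' then pvInnerA stack word r
    else if c = ')' then (if word ∈ stack then stack else stack ++ [word])
    else pvInnerA stack (word.push c) r

def commasReduction (text : String) : List String :=
  let cs := text.toList
  let stack := (PySem.List.pyRange 0 (cs.length : Int) 1).foldl
    (fun stack ch =>
      if PySem.List.pyGet? cs ch = some '(' then
        pvInnerA stack "" (PySem.List.slice cs (some (ch + 1)) none)
      else stack) []
  if PySem.Str.isIn "(" text then stack else stack ++ [text]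

-- ===== PORT B =====
def pvStepB (st : List String × List String) (c : Char) : List String × List String :=
  if c = '(' then (st.1 ++ [""], st.2)
  else if c = ')' then
    ([], st.1.foldl (fun stack w => if w ∈ stack then stack else stack ++ [w]) st.2)
  else (st.1.map (fun w => w.push c), st.2)

def commasReduction_alt (text : String) : List String :=
  let st := text.toList.foldl pvStepB ([], [])
  if PySem.Str.isIn "(" text then st.2 else st.2 ++ [text]

-- ===== PRECONDITION & SPEC =====
def Spec_commasReduction (text : String) (out : List String) : Prop := out = commasReduction_alt text
instance (text : String) (out : List String) : Decidable (Spec_commasReduction text out) := by unfold Spec_commasReduction; infer_instance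

-- ===== CLAIM (what is proved, stated in full; the proofs are below) =====
def Claim_equal_commasReduction : Prop := ∀ (text : String), Dom_commasReduction text → Spec_commasReduction text (commasReduction text)

-- ===== LEMMAS AND PROOFS =====

-- A's outer loop as structural recursion over the suffix list
def pvARec : List Char → List String → List String
  | [], stack => stack
  | c :: r, stack => pvARec r (if c = '(' then pvInnerA stack "" r else stack)

def pvPush (stack : List String) (w : String) : List String :=
  if w ∈ stack then stack else stack ++ [w]

def pvExtend (s : String) (l : List Char) : String := l.foldl String.push s

def pvUpTo (r : List Char) : List Char :=
  (r.takeWhile (fun c => !(c = ')' : Bool))).filter (fun c => !(c = '(' : Bool))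

def pvResolve (active : List String) (stack : List String) (r : List Char) : List String :=
  if ')' ∈ r then active.foldl (fun st a => pvPush st (pvExtend a (pvUpTo r))) stack else stack

theorem pvInnerA_spec (r : List Char) : ∀ (stack : List String) (acc : String),
    pvInnerA stack acc r = if ')' ∈ r then pvPush stack (pvExtend acc (pvUpTo r)) else stack := by
  induction r with
  | nil => intro stack acc; simp [pvInnerA]
  | cons c r ih =>
    intro stack acc
    by_cases hop : c = '('
    · subst hop
      simp only [pvInnerA, reduceIte]
      rw [ih]
      simp [pvUpTo]
    · by_cases hcl : c = ')'
      · subst hcl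
        simp [pvInnerA, pvUpTo, pvPush, pvExtend]
      · simp only [pvInnerA, if_neg hop, if_neg hcl]
        rw [ih]
        have hmem : (')' ∈ c :: r) ↔ (')' ∈ r) := by simp [eq_comm, hcl]
        have hup : pvUpTo (c :: r) = c :: pvUpTo r := by
          simp [pvUpTo, hcl, hop]
        by_cases h : ')' ∈ r
        · rw [if_pos h, if_pos (hmem.mpr h), hup]
          rfl
        · rw [if_neg h, if_neg (fun hh => h (hmem.mp hh))]

theorem pvB_loop (r : List Char) : ∀ (active stack : List String),
    (r.foldl pvStepB (active, stack)).2 = pvARec r (pvResolve active stack r) := by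
  induction r with
  | nil => intro active stack; simp [pvARec, pvResolve]
  | cons c r ih =>
    intro active stack
    by_cases hop : c = '('
    · subst hop
      simp only [List.foldl_cons, pvStepB, reduceIte]
      rw [ih]
      simp only [pvARec, reduceIte]
      congr 1
      rw [pvInnerA_spec]
      by_cases h : ')' ∈ r
      · simp only [pvResolve, if_pos h, List.mem_cons, if_pos (Or.inr h : ')' = '(' ∨ ')' ∈ r)]
        rw [List.foldl_append]
        simp [pvUpTo]
      · simp [pvResolve, h]
    · by_cases hcl : c = ')'
      · subst hcl
        simp only [List.foldl_cons, pvStepB, reduceIte]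
        rw [ih]
        simp only [pvARec, if_neg hop]
        have h1 : ∀ s, pvResolve [] s r = s := by
          intro s; simp [pvResolve]
        rw [h1]
        simp only [pvResolve, List.mem_cons, true_or]
        have : pvUpTo (')' :: r) = [] := by simp [pvUpTo]
        rw [this]
        rfl
      · simp only [List.foldl_cons, pvStepB, if_neg hop, if_neg hcl]
        rw [ih]
        simp only [pvARec, if_neg hop]
        congr 1
        have hmem : (')' ∈ c :: r) ↔ (')' ∈ r) := by simp [eq_comm, hcl]
        have hup : pvUpTo (c :: r) = c :: pvUpTo r := by simp [pvUpTo, hcl, hop]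
        by_cases h : ')' ∈ r
        · simp only [pvResolve, if_pos h, if_pos (hmem.mpr h), hup, List.foldl_map]
          rfl
        · simp [pvResolve, h, hmem]

theorem pvA_bridge (suf : List Char) : ∀ (pre : List Char) (stack : List String),
    (PySem.List.pyRange (pre.length : Int) (((pre ++ suf).length : Nat) : Int) 1).foldl
      (fun stack ch =>
        if PySem.List.pyGet? (pre ++ suf) ch = some '(' then
          pvInnerA stack "" (PySem.List.slice (pre ++ suf) (some (ch + 1)) none)
        else stack) stack
    = pvARec suf stack := by
  induction suf with
  | nil =>
    intro pre stack
    rw [PySem.List.pyRange_one_eq_nil (by simp)]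
    rfl
  | cons c r ih =>
    intro pre stack
    rw [PySem.List.pyRange_one_cons (by simp)]
    simp only [List.foldl_cons]
    have hget : PySem.List.pyGet? (pre ++ c :: r) (pre.length : Int) = some c :=
      PySem.List.pyGet?_append_length pre r c
    have hslice : PySem.List.slice (pre ++ c :: r) (some ((pre.length : Int) + 1)) none = r := by
      have : ((pre.length : Int) + 1) = (((pre.length + 1 : Nat)) : Int) := by push_cast; ring
      rw [this, PySem.List.slice_from_natCast]
      have : pre ++ c :: r = (pre ++ [c]) ++ r := by simp
      rw [this]
      have hl : (pre ++ [c]).length = pre.length + 1 := by simp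
      rw [← hl, List.drop_left]
    rw [hget, hslice]
    have hre : pre ++ c :: r = (pre ++ [c]) ++ r := by simp
    have hcast : (pre.length : Int) + 1 = (((pre ++ [c]).length : Nat) : Int) := by
      simp
    set stack' := (if some c = some '(' then pvInnerA stack "" r else stack) with hstack'
    have := ih (pre ++ [c]) stack'
    rw [hre, hcast]
    rw [this]
    simp only [pvARec]
    congr 1
    rw [hstack']
    by_cases hop : c = '('
    · simp [hop]
    · rw [if_neg hop, if_neg (by simpa using hop)]

-- ===== VERDICT (by name: the statement is the Claim_ definition above) =====
theorem commasReduction_spec : Claim_equal_commasReduction := by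
  intro text _
  unfold Spec_commasReduction commasReduction commasReduction_alt
  have hA := pvA_bridge text.toList [] ([] : List String)
  simp only [List.nil_append, List.length_nil, Nat.cast_zero] at hA
  have hB := pvB_loop text.toList [] []
  have hres : pvResolve [] [] text.toList = [] := by simp [pvResolve]
  rw [hres] at hB
  simp only []
  rw [hA, hB]
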